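-- pv_equiv track=rewrite | github.com/VectorlyApp/bluebox | bluebox/endpoint_discovery/extractors.py | _classify_url
-- ===== SOURCE A (Python) =====
-- def _classify_url(url: str) -> list[str]:
--     """Classify a URL into tags based on its pattern."""
--     tags: list[str] = []
--     url_lower = url.lower()
--
--     if any(seg in url_lower for seg in ('/api/', '/v1/', '/v2/', '/v3/', '/graphql')):
--         tags.append('api')
--     if any(seg in url_lower for seg in ('/config/', '.json', '/metadata')):
--         tags.append('config')
--     if any(seg in url_lower for seg in ('analytics', 'tracking', 'pixel', 'beacon', 'telemetry')):
--         tags.append('tracking')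
--     if any(seg in url_lower for seg in ('cdn', 'static', 'resources', 'assets', '/img/', '/images/')):
--         tags.append('cdn')
--     if any(seg in url_lower for seg in ('/auth', '/oauth', '/login', '/token', '/session')):
--         tags.append('auth')
--     if any(seg in url_lower for seg in ('/search', '/query', '/find')):
--         tags.append('search')
--     if any(seg in url_lower for seg in ('/content/', '/article', '/post')):
--         tags.append('content')
--
--     return tags or ['other']
-- ===== SOURCE B (Python) =====
-- _PATTERNS = [
--     ('/api/', 'api'), ('/v1/', 'api'), ('/v2/', 'api'), ('/v3/', 'api'), ('/graphql', 'api'),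
--     ('/config/', 'config'), ('.json', 'config'), ('/metadata', 'config'),
--     ('analytics', 'tracking'), ('tracking', 'tracking'), ('pixel', 'tracking'),
--     ('beacon', 'tracking'), ('telemetry', 'tracking'),
--     ('cdn', 'cdn'), ('static', 'cdn'), ('resources', 'cdn'), ('assets', 'cdn'),
--     ('/img/', 'cdn'), ('/images/', 'cdn'),
--     ('/auth', 'auth'), ('/oauth', 'auth'), ('/login', 'auth'), ('/token', 'auth'), ('/session', 'auth'),
--     ('/search', 'search'), ('/query', 'search'), ('/find', 'search'),
--     ('/content/', 'content'), ('/article', 'content'), ('/post', 'content'),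
-- ]
-- _ORDER = ['api', 'config', 'tracking', 'cdn', 'auth', 'search', 'content']
--
--
-- def _sweep(u: str) -> set:
--     # single left-to-right sweep: at each position try every pattern of the
--     # flat (segment, tag) table, recording the tags that match somewhere
--     matched = set()
--     for i in range(len(u)):
--         for seg, tag in _PATTERNS:
--             if tag not in matched and u.startswith(seg, i):
--                 matched.add(tag)
--     return matched
--
--
-- def _classify_url(url: str) -> list[str]:
--     matched = _sweep(url.lower())
--     tags = [t for t in _ORDER if t in matched]
--     return tags or ['other']
-- ===== Notes on version B (the rewrite author's own statement) =====
-- stated objective: alternative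
-- what changed: B replaces seven independent substring searches with a single left-to-right sweep of the lowered URL against one flat (segment, tag) pattern table, collecting a matched-tag set and emitting tags in canonical order; same asymptotics, slower constants than the C-level substring search.
import Mathlib
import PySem

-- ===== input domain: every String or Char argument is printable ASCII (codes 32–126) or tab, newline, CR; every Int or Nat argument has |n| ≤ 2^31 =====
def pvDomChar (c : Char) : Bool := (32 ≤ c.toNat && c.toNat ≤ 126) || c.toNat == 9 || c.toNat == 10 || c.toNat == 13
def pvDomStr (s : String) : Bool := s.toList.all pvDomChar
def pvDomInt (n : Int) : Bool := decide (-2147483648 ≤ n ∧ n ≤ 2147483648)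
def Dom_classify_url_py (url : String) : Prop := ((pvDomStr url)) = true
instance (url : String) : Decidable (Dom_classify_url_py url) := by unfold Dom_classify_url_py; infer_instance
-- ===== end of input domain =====

-- B replaces A's seven independent substring searches with one left-to-right sweep over the
-- lowered URL against a flat (segment, tag) pattern table, collecting a matched-tag set
-- (alternative algorithm; same asymptotics but slower constants in Python than the built-in substring search).


-- ===== PORT A =====
def classify_url_py (url : String) : List String :=
  let url_lower := PySem.Str.lower url
  let tags : List String := []
  let tags := if ["/api/", "/v1/", "/v2/", "/v3/", "/graphql"].any (fun seg => PySem.Str.isIn seg url_lower) then tags ++ ["api"] else tags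
  let tags := if ["/config/", ".json", "/metadata"].any (fun seg => PySem.Str.isIn seg url_lower) then tags ++ ["config"] else tags
  let tags := if ["analytics", "tracking", "pixel", "beacon", "telemetry"].any (fun seg => PySem.Str.isIn seg url_lower) then tags ++ ["tracking"] else tags
  let tags := if ["cdn", "static", "resources", "assets", "/img/", "/images/"].any (fun seg => PySem.Str.isIn seg url_lower) then tags ++ ["cdn"] else tags
  let tags := if ["/auth", "/oauth", "/login", "/token", "/session"].any (fun seg => PySem.Str.isIn seg url_lower) then tags ++ ["auth"] else tags
  let tags := if ["/search", "/query", "/find"].any (fun seg => PySem.Str.isIn seg url_lower) then tags ++ ["search"] else tags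
  let tags := if ["/content/", "/article", "/post"].any (fun seg => PySem.Str.isIn seg url_lower) then tags ++ ["content"] else tags
  if tags = [] then ["other"] else tags

-- ===== PORT B =====
def pvPatterns : List (String × String) :=
  [("/api/", "api"), ("/v1/", "api"), ("/v2/", "api"), ("/v3/", "api"), ("/graphql", "api"),
   ("/config/", "config"), (".json", "config"), ("/metadata", "config"),
   ("analytics", "tracking"), ("tracking", "tracking"), ("pixel", "tracking"),
   ("beacon", "tracking"), ("telemetry", "tracking"),
   ("cdn", "cdn"), ("static", "cdn"), ("resources", "cdn"), ("assets", "cdn"),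
   ("/img/", "cdn"), ("/images/", "cdn"),
   ("/auth", "auth"), ("/oauth", "auth"), ("/login", "auth"), ("/token", "auth"), ("/session", "auth"),
   ("/search", "search"), ("/query", "search"), ("/find", "search"),
   ("/content/", "content"), ("/article", "content"), ("/post", "content")]

def pvOrder : List String :=
  ["api", "config", "tracking", "cdn", "auth", "search", "content"]

-- u.startswith(seg, i) for a Nat offset i: exact (Python compares seg with u[i:i+len(seg)])
def pvStartsAt (u seg : List Char) (i : Nat) : Bool := seg.isPrefixOf (u.drop i)

-- the single left-to-right sweep collecting the matched-tag set (Source B's _sweep)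
def pvSweep (u : List Char) : PySem.Set String :=
  (List.range u.length).foldl
    (fun m i => pvPatterns.foldl
      (fun m p => if !(m.contains p.2) && pvStartsAt u p.1.toList i then PySem.Set.add m p.2 else m)
      m)
    PySem.Set.empty

def classify_url_py_alt (url : String) : List String :=
  let matched := pvSweep (PySem.Str.lower url).toList
  let tags := pvOrder.filter (fun t => matched.contains t)
  if tags = [] then ["other"] else tags

-- ===== PRECONDITION & SPEC =====
def Spec_classify_url_py (url : String) (out : List String) : Prop := out = classify_url_py_alt url
instance (url : String) (out : List String) : Decidable (Spec_classify_url_py url out) := by unfold Spec_classify_url_py; infer_instance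

-- ===== CLAIM (what is proved, stated in full; the proofs are below) =====
def Claim_equal_classify_url_py : Prop := ∀ (url : String), Dom_classify_url_py url → Spec_classify_url_py url (classify_url_py url)

-- ===== LEMMAS AND PROOFS =====

-- one step of B's inner loop only adds the tag when its segment starts here
theorem mem_step (u : List Char) (i : Nat) (p : String × String) (m : PySem.Set String) (t : String) :
    t ∈ (if !(m.contains p.2) && pvStartsAt u p.1.toList i then PySem.Set.add m p.2 else m) ↔
      t ∈ m ∨ (p.2 = t ∧ pvStartsAt u p.1.toList i = true) := by
  split_ifs with hc
  · simp only [Bool.and_eq_true, Bool.not_eq_true', PySem.Set.contains_eq_listContains] at hc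
    rw [PySem.Set.mem_add]
    constructor
    · rintro (h | rfl)
      · exact .inl h
      · exact .inr ⟨rfl, hc.2⟩
    · rintro (h | ⟨rfl, _⟩)
      · exact .inl h
      · exact .inr rfl
  · constructor
    · exact .inl
    · rintro (h | ⟨rfl, hs⟩)
      · exact h
      · refine List.contains_iff_mem.mp ?_
        cases hcc : List.contains m p.2
        · exact absurd (by rw [PySem.Set.contains_eq_listContains, hcc, hs]; rfl) hc
        · rfl

-- membership in B's inner fold over the pattern table
theorem mem_inner_fold (u : List Char) (i : Nat) (ps : List (String × String)) (m : PySem.Set String) (t : String) :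
    t ∈ ps.foldl (fun m p => if !(m.contains p.2) && pvStartsAt u p.1.toList i then PySem.Set.add m p.2 else m) m ↔
      t ∈ m ∨ ∃ p ∈ ps, p.2 = t ∧ pvStartsAt u p.1.toList i = true := by
  induction ps generalizing m with
  | nil => simp
  | cons p ps ih =>
    simp only [List.foldl_cons, ih, mem_step, List.exists_mem_cons_iff]
    tauto

-- membership in the sweep's outer fold over the text positions
theorem mem_outer_fold (u : List Char) (is : List Nat) (m : PySem.Set String) (t : String) :
    t ∈ is.foldl (fun m i => pvPatterns.foldl
        (fun m p => if !(m.contains p.2) && pvStartsAt u p.1.toList i then PySem.Set.add m p.2 else m) m) m ↔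
      t ∈ m ∨ ∃ i ∈ is, ∃ p ∈ pvPatterns, p.2 = t ∧ pvStartsAt u p.1.toList i = true := by
  induction is generalizing m with
  | nil => simp
  | cons i is ih =>
    simp only [List.foldl_cons, ih, mem_inner_fold, List.mem_cons]
    constructor
    · rintro ((h | h) | ⟨j, hj, h⟩)
      · exact .inl h
      · exact .inr ⟨i, .inl rfl, h⟩
      · exact .inr ⟨j, .inr hj, h⟩
    · rintro (h | ⟨j, (rfl | hj), h⟩)
      · exact .inl (.inl h)
      · exact .inl (.inr h)
      · exact .inr ⟨j, hj, h⟩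

-- the sweep contains a tag iff some pattern with that tag starts at some position
theorem contains_sweep (u : List Char) (t : String) :
    (pvSweep u).contains t = true ↔
      ∃ p ∈ pvPatterns, p.2 = t ∧ ∃ i ∈ List.range u.length, pvStartsAt u p.1.toList i = true := by
  rw [PySem.Set.contains_eq_listContains, List.contains_iff_mem, pvSweep, mem_outer_fold]
  constructor
  · rintro (h | ⟨i, hi, p, hp, h1, h2⟩)
    · simp [PySem.Set.empty] at h
    · exact ⟨p, hp, h1, i, hi, h2⟩
  · rintro ⟨p, hp, h1, i, hi, h2⟩
    exact .inr ⟨i, hi, p, hp, h1, h2⟩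

-- a nonempty segment is a substring iff it starts at some position < length
theorem isIn_iff_exists_startsAt (seg : List Char) (hne : seg ≠ []) (u : List Char) :
    PySem.Chars.isIn seg u = true ↔ ∃ i ∈ List.range u.length, pvStartsAt u seg i = true := by
  rw [← PySem.Chars.exists_prefix_drop_iff_isIn]
  constructor
  · rintro ⟨j, hj⟩
    have hlt : j < u.length := by
      by_contra h
      rw [List.drop_eq_nil_of_le (by omega)] at hj
      exact hne (List.prefix_nil.mp hj)
    exact ⟨j, List.mem_range.mpr hlt, by simpa [pvStartsAt, List.isPrefixOf_iff_prefix]⟩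
  · rintro ⟨i, _, h⟩
    exact ⟨i, by simpa [pvStartsAt, List.isPrefixOf_iff_prefix] using h⟩

-- the sweep's test for one tag equals A's "some segment of the group occurs" test
theorem contains_eq_any (u : List Char) (t : String) (segs : List String)
    (h1 : ∀ p ∈ pvPatterns, p.2 = t → p.1 ∈ segs)
    (h2 : ∀ s ∈ segs, (s, t) ∈ pvPatterns)
    (h3 : ∀ s ∈ segs, s.toList ≠ []) :
    (pvSweep u).contains t = segs.any (fun seg => PySem.Chars.isIn seg.toList u) := by
  rw [Bool.eq_iff_iff, contains_sweep, List.any_eq_true]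
  constructor
  · rintro ⟨p, hp, ht, hi⟩
    exact ⟨p.1, h1 p hp ht, (isIn_iff_exists_startsAt p.1.toList (h3 _ (h1 p hp ht)) u).mpr hi⟩
  · rintro ⟨s, hs, h⟩
    exact ⟨(s, t), h2 s hs, rfl, (isIn_iff_exists_startsAt s.toList (h3 s hs) u).mp h⟩

-- ===== VERDICT (by name: the statement is the Claim_ definition above) =====
set_option maxHeartbeats 1000000 in
theorem classify_url_py_spec : Claim_equal_classify_url_py := by
  intro url _
  unfold Spec_classify_url_py classify_url_py classify_url_py_alt
  simp only [pvOrder, List.filter_cons, List.filter_nil,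
    contains_eq_any _ "api" ["/api/", "/v1/", "/v2/", "/v3/", "/graphql"] (by decide) (by decide) (by decide),
    contains_eq_any _ "config" ["/config/", ".json", "/metadata"] (by decide) (by decide) (by decide),
    contains_eq_any _ "tracking" ["analytics", "tracking", "pixel", "beacon", "telemetry"] (by decide) (by decide) (by decide),
    contains_eq_any _ "cdn" ["cdn", "static", "resources", "assets", "/img/", "/images/"] (by decide) (by decide) (by decide),
    contains_eq_any _ "auth" ["/auth", "/oauth", "/login", "/token", "/session"] (by decide) (by decide) (by decide),
    contains_eq_any _ "search" ["/search", "/query", "/find"] (by decide) (by decide) (by decide),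
    contains_eq_any _ "content" ["/content/", "/article", "/post"] (by decide) (by decide) (by decide),
    PySem.Str.isIn_eq, PySem.Str.toList_lower]
  generalize (["/api/", "/v1/", "/v2/", "/v3/", "/graphql"].any
      (fun seg => PySem.Chars.isIn seg.toList (PySem.Chars.lower url.toList))) = c1
  generalize (["/config/", ".json", "/metadata"].any
      (fun seg => PySem.Chars.isIn seg.toList (PySem.Chars.lower url.toList))) = c2
  generalize (["analytics", "tracking", "pixel", "beacon", "telemetry"].any
      (fun seg => PySem.Chars.isIn seg.toList (PySem.Chars.lower url.toList))) = c3
  generalize (["cdn", "static", "resources", "assets", "/img/", "/images/"].any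
      (fun seg => PySem.Chars.isIn seg.toList (PySem.Chars.lower url.toList))) = c4
  generalize (["/auth", "/oauth", "/login", "/token", "/session"].any
      (fun seg => PySem.Chars.isIn seg.toList (PySem.Chars.lower url.toList))) = c5
  generalize (["/search", "/query", "/find"].any
      (fun seg => PySem.Chars.isIn seg.toList (PySem.Chars.lower url.toList))) = c6
  generalize (["/content/", "/article", "/post"].any
      (fun seg => PySem.Chars.isIn seg.toList (PySem.Chars.lower url.toList))) = c7
  cases c1 <;> cases c2 <;> cases c3 <;> cases c4 <;> cases c5 <;> cases c6 <;> cases c7 <;> rfl
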